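-- pv_equiv track=rewrite | github.com/Jpn666/scripts | png.py | expandrow
-- ===== SOURCE A (Python) =====
-- def expandrow(row, width, bbp):
--     r = []
--     i = 0
--     j = 8 - bbp
--     n = 0
--     mask = (1 << bbp) - 1
--     while n < width:
--         if 0 > j:
--             i += 1
--             j  = 8 - bbp
--
--         r.append((row[i] >> j) & mask)
--         j -= bbp
--         n += 1
--     return r
-- ===== SOURCE B (Python) =====
-- def expandrow(row, width, bbp):
--     mask = (1 << bbp) - 1
--     per = 8 // bbp
--     return [(row[k // per] >> (8 - bbp * (k % per + 1))) & mask for k in range(width)]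
-- ===== Notes on version B (the rewrite author's own statement) =====
-- stated objective: simpler
-- what changed: Replaces A's stateful while-loop (running byte index i and shift register j with mid-loop resets) by a closed-form per-sample computation: sample k is (row[k // per] >> (8 - bbp*(k % per + 1))) & mask with per = 8 // bbp, built in a single comprehension with no loop-carried state.
-- outside the precondition, e.g. on expandrow([5], 2, 0): A returns [0, 0], B raises ZeroDivisionError
import Mathlib
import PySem

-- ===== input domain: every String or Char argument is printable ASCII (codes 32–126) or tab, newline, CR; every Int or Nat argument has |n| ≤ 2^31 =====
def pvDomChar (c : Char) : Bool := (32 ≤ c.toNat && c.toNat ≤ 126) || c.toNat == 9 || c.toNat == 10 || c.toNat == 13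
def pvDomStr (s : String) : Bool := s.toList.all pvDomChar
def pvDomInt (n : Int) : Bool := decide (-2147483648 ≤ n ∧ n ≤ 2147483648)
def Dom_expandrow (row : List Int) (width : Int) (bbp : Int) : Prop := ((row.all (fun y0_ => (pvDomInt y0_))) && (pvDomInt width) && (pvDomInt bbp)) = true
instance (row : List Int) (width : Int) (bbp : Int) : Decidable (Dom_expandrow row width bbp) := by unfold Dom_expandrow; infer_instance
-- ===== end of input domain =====

-- B replaces A's stateful while-loop (running byte index i, shift register j with mid-loop resets)
-- by a closed-form per-sample index/shift computation in a single comprehension (objective: simpler).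


-- ===== PORT A =====
-- A's while loop, one fuel step per appended sample (fuel = width.toNat since n
-- increments every iteration).  row[i] is ported as pyGetD row i 0: inside Pre_
-- the index is always in range, so the default is never read.
def expandrowGo (row : List Int) (bbp mask : Int) : Nat → Int → Int → List Int → List Int
  | 0, _, _, r => r
  | f+1, i, j, r =>
    let i' := if 0 > j then i + 1 else i
    let j' := if 0 > j then 8 - bbp else j
    let v := PySem.Int.band ((PySem.List.pyGetD row i' 0) >>> j'.toNat) mask
    expandrowGo row bbp mask f i' (j' - bbp) (r ++ [v])

def expandrow (row : List Int) (width : Int) (bbp : Int) : List Int :=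
  expandrowGo row bbp ((1 <<< bbp.toNat) - 1) width.toNat 0 (8 - bbp) []

-- ===== PORT B =====
-- B: per = 8 // bbp samples per byte; sample k is (row[k // per] >> (8 - bbp*(k % per + 1))) & mask,
-- built by a comprehension over range(width).
def expandrow_alt (row : List Int) (width : Int) (bbp : Int) : List Int :=
  let mask : Int := (1 <<< bbp.toNat) - 1
  let per : Int := PySem.Int.floordiv 8 bbp
  (PySem.List.pyRange 0 width 1).map (fun k =>
    PySem.Int.band ((PySem.List.pyGetD row (PySem.Int.floordiv k per) 0) >>>
      (8 - bbp * (PySem.Int.mod k per + 1)).toNat) mask)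

-- ===== PRECONDITION & SPEC =====
-- Pre_ excludes: bbp < 0 (A raises ValueError on the negative shift in mask); bbp = 0, where
-- A's value (width copies of 0, its loop never advancing) is an artefact and B raises
-- ZeroDivisionError; bbp > 8 with width > 0 (A raises ValueError on a negative shift count);
-- and rows holding fewer than width packed samples, where both A and B raise IndexError.
def Pre_expandrow (row : List Int) (width : Int) (bbp : Int) : Prop :=
  1 ≤ bbp ∧ (width ≤ 0 ∨ (bbp ≤ 8 ∧ width ≤ (row.length : Int) * PySem.Int.floordiv 8 bbp))
instance (row : List Int) (width : Int) (bbp : Int) : Decidable (Pre_expandrow row width bbp) := by unfold Pre_expandrow; infer_instance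
def pvWitness_expandrow : List Int × Int × Int := ([198, 31], 7, 2)

def Spec_expandrow (row : List Int) (width : Int) (bbp : Int) (out : List Int) : Prop := out = expandrow_alt row width bbp
instance (row : List Int) (width : Int) (bbp : Int) (out : List Int) : Decidable (Spec_expandrow row width bbp out) := by unfold Spec_expandrow; infer_instance

-- ===== CLAIM (what is proved, stated in full; the proofs are below) =====
def Claim_equal_expandrow : Prop := ∀ (row : List Int) (width : Int) (bbp : Int), Dom_expandrow row width bbp → Pre_expandrow row width bbp → Spec_expandrow row width bbp (expandrow row width bbp)

-- ===== LEMMAS AND PROOFS =====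

-- B's closed-form sample k, with the byte index and position taken in Nat
def sampleN (row : List Int) (bbp mask : Int) (p : Nat) (k : Nat) : Int :=
  PySem.Int.band ((PySem.List.pyGetD row ((k / p : Nat) : Int) 0) >>>
    (8 - bbp * (((k % p : Nat) : Int) + 1)).toNat) mask

-- the bisimulation: A's loop state (i, j) entering the iteration for sample n is
-- (0, 8-bbp) at n = 0 and the post-sample state of n-1 afterwards; the loop then emits
-- exactly B's closed-form samples n, n+1, …
lemma go_eq (row : List Int) (bbp mask : Int) (b p : Nat)
    (hb : bbp = (b : Int)) (hb1 : 1 ≤ b) (hb8 : b ≤ 8) (hp : p = 8 / b) :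
    ∀ (f n : Nat) (i j : Int) (out : List Int),
      ((n = 0 ∧ i = 0 ∧ j = 8 - bbp) ∨
       (0 < n ∧ i = (((n-1)/p : Nat) : Int) ∧ j = 8 - bbp * ((((n-1)%p : Nat) : Int) + 2))) →
      expandrowGo row bbp mask f i j out
        = out ++ (List.range f).map (fun t => sampleN row bbp mask p (n + t)) := by
  have hp1 : 1 ≤ p := by
    rw [hp]; exact Nat.one_le_div_iff (by omega) |>.mpr hb8
  have hq2 : b * p + 8 % b = 8 := by rw [hp]; exact Nat.div_add_mod 8 b
  have hqlt : 8 % b < b := Nat.mod_lt _ (by omega)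
  intro f
  induction f with
  | zero => intro n i j out _; simp [expandrowGo]
  | succ f ih =>
    intro n i j out hinv
    -- post-reset state for sample n
    have key : (if 0 > j then i + 1 else i) = ((n / p : Nat) : Int)
        ∧ (if 0 > j then 8 - bbp else j) = 8 - bbp * (((n % p : Nat) : Int) + 1) := by
      rcases hinv with ⟨hn, hi, hj⟩ | ⟨hn, hi, hj⟩
      · subst hn
        have hjge : ¬ 0 > j := by rw [hj, hb]; omega
        rw [if_neg hjge, if_neg hjge, hi, hj]
        simp [Nat.zero_div, Nat.zero_mod]
      · -- n ≥ 1; m = (n-1) % p, d = (n-1) / p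
        set m := (n-1) % p with hm
        set d := (n-1) / p with hd
        have hmp : m < p := by rw [hm]; exact Nat.mod_lt _ (by omega)
        have hnd : n = (m + 1) + p * d := by
          have h := Nat.div_add_mod (n-1) p
          rw [← hd, ← hm] at h
          omega
        by_cases hcase : m + 1 < p
        · -- same byte: j stays nonnegative
          have hleN : b * (m + 2) ≤ 8 := by
            have h1 : b * (m + 2) ≤ b * p := Nat.mul_le_mul_left b (by omega)
            omega
          have hle : (b : Int) * ((m : Int) + 2) ≤ 8 := by exact_mod_cast hleN
          have hjge : ¬ 0 > j := by rw [hj, hb]; omega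
          have hdiv : n / p = d := by
            rw [hnd, Nat.add_mul_div_left _ _ (by omega : 0 < p),
              Nat.div_eq_of_lt hcase, Nat.zero_add]
          have hmod : n % p = m + 1 := by
            rw [hnd, Nat.add_mul_mod_self_left, Nat.mod_eq_of_lt hcase]
          rw [if_neg hjge, if_neg hjge, hi, hj, hdiv, hmod]
          constructor
          · rfl
          · push_cast; ring
        · -- byte boundary: m + 1 = p, j is negative, the loop resets
          have hmp1 : m + 1 = p := by omega
          have hgtN : 8 < b * (m + 2) := by
            have h1 : b * (m + 2) = b * p + b := by
              rw [show m + 2 = p + 1 from by omega]; ring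
            omega
          have hgt : (8 : Int) < (b : Int) * ((m : Int) + 2) := by exact_mod_cast hgtN
          have hjlt : 0 > j := by rw [hj, hb]; omega
          have hnd' : n = p * (d + 1) := by
            have h1 : p * (d + 1) = p + p * d := by ring
            omega
          have hdiv : n / p = d + 1 := by
            rw [hnd', Nat.mul_div_cancel_left _ (by omega : 0 < p)]
          have hmod : n % p = 0 := by
            rw [hnd', Nat.mul_mod_right]
          rw [if_pos hjlt, if_pos hjlt, hi, hdiv, hmod]
          constructor
          · push_cast; ring
          · push_cast; ring
    obtain ⟨hi', hj'⟩ := key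
    -- one loop step
    have hstep : expandrowGo row bbp mask (f+1) i j out
        = expandrowGo row bbp mask f ((n / p : Nat) : Int)
            ((8 - bbp * (((n % p : Nat) : Int) + 1)) - bbp)
            (out ++ [sampleN row bbp mask p n]) := by
      simp only [expandrowGo, hi', hj', sampleN]
    rw [hstep, ih (n+1) _ _ _ (Or.inr ⟨Nat.succ_pos n, by simp, by push_cast; ring⟩)]
    rw [List.range_succ_eq_map, List.map_cons, List.map_map, List.append_assoc]
    simp only [Nat.add_zero, List.singleton_append, Function.comp_def]
    congr 2
    apply List.map_congr_left
    intro t _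
    congr 1
    omega

-- ===== VERDICT (by name: the statement is the Claim_ definition above) =====
theorem expandrow_spec : Claim_equal_expandrow := by
  intro row width bbp _ hpre
  obtain ⟨hb1, hrest⟩ := hpre
  unfold Spec_expandrow expandrow expandrow_alt
  by_cases hw : width ≤ 0
  · rw [Int.toNat_of_nonpos hw]
    have : PySem.List.pyRange 0 width 1 = [] := by
      unfold PySem.List.pyRange
      simp [show ¬ (0:Int) < width by omega]
    simp [expandrowGo, this]
  · have hwpos : 0 < width := by omega
    obtain ⟨hb8, -⟩ : bbp ≤ 8 ∧ width ≤ (row.length : Int) * PySem.Int.floordiv 8 bbp := by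
      rcases hrest with h | h
      · omega
      · exact h
    set b : Nat := bbp.toNat with hbdef
    have hb : bbp = (b : Int) := by omega
    have hmain := go_eq row bbp ((1 <<< bbp.toNat) - 1) b (8 / b) hb (by omega) (by omega) rfl
      width.toNat 0 0 (8 - bbp) [] (Or.inl ⟨rfl, rfl, rfl⟩)
    rw [hmain]
    have hwc : width = ((width.toNat : Nat) : Int) := by omega
    rw [hwc, PySem.List.pyRange_zero_natCast, List.map_map]
    simp only [List.nil_append, Nat.zero_add]
    apply List.map_congr_left
    intro k _
    simp only [Function.comp_def, sampleN]
    rw [hb]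
    rw [show ((8:Int)) = ((8:Nat) : Int) by norm_num, PySem.Int.floordiv_natCast,
      PySem.Int.floordiv_natCast, PySem.Int.mod_natCast]
    simp only [Int.toNat_natCast]
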